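-- pv_equiv track=rewrite | github.com/SniAssia/Python_projects | algo/arbre couvrant.py | arbre
-- ===== SOURCE A (Python) =====
-- def voisins(e,node):
--    voisins=[]
--    for i in range(len(e)):
--       if e[i][0]==node  :
--          voisins.append(e[i][1])
--
--       elif e[i][1]==node  :
--          voisins.append(e[i][0])
--
--    return voisins
--
-- def arbre(v,e,node):
--    visited=[]
--    tree=[]
--    stack=[node]
--    while stack :
--       current=stack.pop()
--       if current not in visited :
--          visited.append(current)
--          for j in voisins(e,current) :
--             if j not in visited :
--                tree.append((current,j))
--                stack.append(j)
--    return tree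
-- ===== SOURCE B (Python) =====
-- def arbre(v, e, node):
--     adj = {}
--     for x, y in e:
--         adj.setdefault(x, []).append(y)
--         if y != x:
--             adj.setdefault(y, []).append(x)
--     seen = set()
--     batches = []
--     stack = [node]
--     while stack:
--         cur = stack.pop()
--         if cur in seen:
--             continue
--         seen.add(cur)
--         fresh = [j for j in adj.get(cur, []) if j not in seen]
--         batches.append([(cur, j) for j in fresh])
--         stack.extend(fresh)
--     return [edge for batch in batches for edge in batch]
-- ===== Notes on version B (the rewrite author's own statement) =====
-- stated objective: alternative
-- what changed: B indexes the edges once into an adjacency dict (A rescans the whole edge list per popped node via voisins), tests visited membership in a set instead of a list, pushes each node's unvisited neighbours onto the stack as one block, and assembles the output at the end by flattening per-node edge batches instead of appending edge by edge.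
import Mathlib
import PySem

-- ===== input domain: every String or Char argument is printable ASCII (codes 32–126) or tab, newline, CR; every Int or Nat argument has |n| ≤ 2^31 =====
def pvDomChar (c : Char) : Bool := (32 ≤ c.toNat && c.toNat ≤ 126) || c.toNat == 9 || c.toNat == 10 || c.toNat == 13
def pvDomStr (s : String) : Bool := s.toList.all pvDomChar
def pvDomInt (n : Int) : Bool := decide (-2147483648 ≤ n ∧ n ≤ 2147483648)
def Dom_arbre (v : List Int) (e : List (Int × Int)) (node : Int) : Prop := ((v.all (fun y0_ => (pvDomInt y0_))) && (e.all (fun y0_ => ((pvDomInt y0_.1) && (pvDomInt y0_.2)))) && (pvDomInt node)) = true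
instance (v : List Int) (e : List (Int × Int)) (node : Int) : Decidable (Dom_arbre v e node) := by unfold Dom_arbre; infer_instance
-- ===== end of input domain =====

-- B replaces A's per-node rescan of the whole edge list (voisins) by an adjacency
-- dict built once, the visited list by a set, pushes neighbours as one block, and
-- flattens per-node edge batches at the end; same output, no measured speed claim.

-- ===== PORT A =====
-- voisins: 'for i in range(len(e)): e[i]' reads every element once, in order;
-- ported as a foldl over e itself (exact on every input).
def voisins (e : List (Int × Int)) (node : Int) : List Int :=
  e.foldl (fun acc p =>
    if p.1 == node then acc ++ [p.2]
    else if p.2 == node then acc ++ [p.1]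
    else acc) []

-- the while loop; the Python stack is kept top-first (stack.pop() = head,
-- stack.append = cons); fuel is a totality guard, large enough for every input.
def arbreLoop (e : List (Int × Int)) : Nat → List Int → List (Int × Int) → List Int → List (Int × Int)
  | 0, _, tree, _ => tree
  | _ + 1, _, tree, [] => tree
  | fuel + 1, visited, tree, current :: stack =>
    if visited.contains current then
      arbreLoop e fuel visited tree stack
    else
      let visited' := visited ++ [current]
      let ts := (voisins e current).foldl
        (fun (ts : List (Int × Int) × List Int) j =>
          if visited'.contains j then ts
          else (ts.1 ++ [(current, j)], j :: ts.2)) (tree, stack)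
      arbreLoop e fuel visited' ts.1 ts.2

def arbre (v : List Int) (e : List (Int × Int)) (node : Int) : List (Int × Int) :=
  arbreLoop e ((2 * e.length + 1) * (e.length + 1) + 1) [] [] [node]

-- ===== PORT B =====
-- adj.setdefault(x, []).append(y) = insert x (getD x [] ++ [y])
def buildAdj (e : List (Int × Int)) : PySem.Dict Int (List Int) :=
  e.foldl (fun d p =>
    let d1 := PySem.Dict.insert d p.1 (PySem.Dict.getD d p.1 [] ++ [p.2])
    if p.2 != p.1 then PySem.Dict.insert d1 p.2 (PySem.Dict.getD d1 p.2 [] ++ [p.1])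
    else d1) (PySem.Dict.mk [])

-- the while loop of Source B: stack top-first, so 'stack.extend(fresh)' followed by
-- pops from the end = 'fresh.reverse ++ rest'; batches collects one edge list per
-- expanded node and is flattened at the end.
def arbreAltGo (adj : PySem.Dict Int (List Int)) : Nat → PySem.Set Int → List (List (Int × Int)) → List Int → List (List (Int × Int))
  | 0, _, batches, _ => batches
  | _ + 1, _, batches, [] => batches
  | fuel + 1, seen, batches, cur :: rest =>
    if PySem.Set.contains seen cur then
      arbreAltGo adj fuel seen batches rest
    else
      let seen' := PySem.Set.add seen cur
      let fresh := (PySem.Dict.getD adj cur []).filter (fun j => !PySem.Set.contains seen' j)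
      arbreAltGo adj fuel seen' (batches ++ [fresh.map (fun j => (cur, j))]) (fresh.reverse ++ rest)

def arbre_alt (v : List Int) (e : List (Int × Int)) (node : Int) : List (Int × Int) :=
  (arbreAltGo (buildAdj e) ((2 * e.length + 1) * (e.length + 1) + 1) ([] : PySem.Set Int) [] [node]).flatten

-- ===== PRECONDITION & SPEC =====
def Spec_arbre (v : List Int) (e : List (Int × Int)) (node : Int) (out : List (Int × Int)) : Prop := out = arbre_alt v e node
instance (v : List Int) (e : List (Int × Int)) (node : Int) (out : List (Int × Int)) : Decidable (Spec_arbre v e node out) := by unfold Spec_arbre; infer_instance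

-- ===== CLAIM =====
def Claim_equal_arbre : Prop := ∀ (v : List Int) (e : List (Int × Int)) (node : Int), Dom_arbre v e node → Spec_arbre v e node (arbre v e node)

-- ===== LEMMAS AND PROOFS =====

-- neighbour list of a node, as a structural recursion (proof vehicle)
def nbrs (e : List (Int × Int)) (x : Int) : List Int :=
  match e with
  | [] => []
  | p :: t => (if x = p.1 then [p.2] else if x = p.2 then [p.1] else []) ++ nbrs t x

lemma voisins_eq_nbrs (e : List (Int × Int)) (x : Int) : voisins e x = nbrs e x := by
  have h : ∀ (e : List (Int × Int)) (acc : List Int),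
      e.foldl (fun acc p =>
        if p.1 == x then acc ++ [p.2]
        else if p.2 == x then acc ++ [p.1]
        else acc) acc = acc ++ nbrs e x := by
    intro e
    induction e with
    | nil => intro acc; simp [nbrs]
    | cons p t ih =>
      intro acc
      simp only [List.foldl_cons, nbrs, ih]
      by_cases h1 : p.1 = x <;> by_cases h2 : p.2 = x
      · simp [h1, h2, List.append_assoc]
      · simp [h1, h2, Ne.symm h2, List.append_assoc]
      · simp [h1, Ne.symm h1, h2, List.append_assoc]
      · simp [h1, Ne.symm h1, h2, Ne.symm h2, List.append_assoc]
  simpa [voisins] using h e []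

lemma buildAdj_step_getD (d : PySem.Dict Int (List Int)) (p : Int × Int) (x : Int) :
    PySem.Dict.getD
      (if p.2 != p.1 then
        PySem.Dict.insert (PySem.Dict.insert d p.1 (PySem.Dict.getD d p.1 [] ++ [p.2])) p.2
          (PySem.Dict.getD (PySem.Dict.insert d p.1 (PySem.Dict.getD d p.1 [] ++ [p.2])) p.2 [] ++ [p.1])
      else PySem.Dict.insert d p.1 (PySem.Dict.getD d p.1 [] ++ [p.2])) x []
    = PySem.Dict.getD d x [] ++ (if x = p.1 then [p.2] else if x = p.2 then [p.1] else []) := by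
  by_cases hne : p.2 = p.1
  · simp only [hne, bne_self_eq_false, Bool.false_eq_true, if_false, PySem.Dict.getD_insert]
    by_cases hx : x = p.1 <;> simp [hx, hne]
  · have hb : (p.2 != p.1) = true := by simp [bne, hne]
    simp only [hb, if_true, PySem.Dict.getD_insert]
    by_cases hx2 : x = p.2
    · simp [hx2, hne, Ne.symm hne]
    · by_cases hx1 : x = p.1 <;> simp [hx1, hx2, Ne.symm hne]

lemma buildAdj_getD (e : List (Int × Int)) (x : Int) :
    PySem.Dict.getD (buildAdj e) x [] = voisins e x := by
  rw [voisins_eq_nbrs]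
  have h : ∀ (e : List (Int × Int)) (d : PySem.Dict Int (List Int)),
      PySem.Dict.getD
        (e.foldl (fun d p =>
          let d1 := PySem.Dict.insert d p.1 (PySem.Dict.getD d p.1 [] ++ [p.2])
          if p.2 != p.1 then PySem.Dict.insert d1 p.2 (PySem.Dict.getD d1 p.2 [] ++ [p.1])
          else d1) d) x []
      = PySem.Dict.getD d x [] ++ nbrs e x := by
    intro e
    induction e with
    | nil => intro d; simp [nbrs]
    | cons p t ih =>
      intro d
      simp only [List.foldl_cons, nbrs, ih]
      rw [buildAdj_step_getD d p x, List.append_assoc]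
  have hbase : PySem.Dict.getD (PySem.Dict.mk ([] : List (Int × List Int))) x [] = [] := by
    simp [PySem.Dict.getD, PySem.Dict.get?]
  simpa [buildAdj, hbase] using h e (PySem.Dict.mk [])

-- A's per-neighbour fold = filter-then-map on the tree side, reversed block on the stack side
lemma fold_push (cur : Int) (vis : List Int) :
    ∀ (ns : List Int) (tree : List (Int × Int)) (rest : List Int),
      ns.foldl (fun (ts : List (Int × Int) × List Int) j =>
          if j ∈ vis then ts
          else (ts.1 ++ [(cur, j)], j :: ts.2)) (tree, rest)
      = (tree ++ (ns.filter (fun j => !decide (j ∈ vis))).map (fun j => (cur, j)),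
         (ns.filter (fun j => !decide (j ∈ vis))).reverse ++ rest) := by
  intro ns
  induction ns with
  | nil => intro tree rest; simp
  | cons j t ih =>
    intro tree rest
    by_cases hj : j ∈ vis
    · simp [hj, ih]
    · simp [hj, ih, List.append_assoc]

lemma go_eq (e : List (Int × Int)) :
    ∀ (fuel : Nat) (vis : List Int) (batches : List (List (Int × Int))) (stack : List Int),
      arbreLoop e fuel vis batches.flatten stack
        = (arbreAltGo (buildAdj e) fuel vis batches stack).flatten := by
  intro fuel
  induction fuel with
  | zero => intro vis batches stack; rfl
  | succ n ih =>
    intro vis batches stack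
    cases stack with
    | nil => rfl
    | cons cur rest =>
      simp only [arbreLoop, arbreAltGo, PySem.Set.contains, PySem.Set.add]
      by_cases hc : cur ∈ vis
      · simp [hc, ih]
      · simp only [hc, List.contains_eq_mem, decide_false, Bool.false_eq_true, if_false,
          decide_eq_true_eq]
        rw [fold_push cur (vis ++ [cur]) (voisins e cur) batches.flatten rest, buildAdj_getD]
        have := ih (vis ++ [cur])
          (batches ++ [((voisins e cur).filter (fun j => !decide (j ∈ vis ++ [cur]))).map (fun j => (cur, j))])
          (((voisins e cur).filter (fun j => !decide (j ∈ vis ++ [cur]))).reverse ++ rest)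
        simpa [List.flatten_append] using this

-- ===== VERDICT =====
theorem arbre_spec : Claim_equal_arbre := by
  intro v e node _
  unfold Spec_arbre arbre arbre_alt
  simpa using go_eq e ((2 * e.length + 1) * (e.length + 1) + 1) [] [] [node]
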